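-- pv_equiv track=rewrite | github.com/Inkhemi/Codember-2025 | Reto_1.py | unlock_door
-- ===== SOURCE A (Python) =====
-- def unlock_door(initial_code, commands):
--     code = [int(digit) for digit in str(initial_code)]
--     iterator = 0
--     for command in commands:
--         match command:
--             case "L":
--                 iterator = (iterator - 1) % len(code)
--             case "R":
--                 iterator = (iterator + 1) % len(code)
--             case "D":
--                 code[iterator] -= 1
--                 if code[iterator] < 0:
--                     code[iterator] = 9
--             case "U":
--                 code[iterator] += 1
--                 if code[iterator] > 9:
--                     code[iterator] = 0
--     return ''.join(map(str, code))
-- ===== SOURCE B (Python) =====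
-- def unlock_door(initial_code, commands):
--     # Phase 1: scan the commands alone, never touching any digits: keep an
--     # UNREDUCED cursor offset (no mod), and record each U/D as an (offset, sign) event.
--     events = []
--     offset = 0
--     for c in commands:
--         if c == "L":
--             offset -= 1
--         elif c == "R":
--             offset += 1
--         elif c == "U":
--             events.append((offset, 1))
--         elif c == "D":
--             events.append((offset, -1))
--     # Phase 2: parse the code and replay the recorded events, reducing the
--     # offset mod len only now and the digit mod 10 instead of clamping.
--     digits = [int(d) for d in str(initial_code)]
--     n = len(digits)
--     for off, s in events:
--         i = off % n
--         digits[i] = (digits[i] + s) % 10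
--     return ''.join(map(str, digits))
-- ===== Notes on version B (the rewrite author's own statement) =====
-- stated objective: alternative
-- what changed: B never simulates A's pointer-over-digits state machine: a first pass reads only the commands, keeping an unreduced integer cursor offset and emitting (offset, sign) events for U/D; a second pass then parses the code and replays the events, taking the offset mod len and the digit mod 10 only at replay time instead of A's per-step clamped mutation.
import Mathlib
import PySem

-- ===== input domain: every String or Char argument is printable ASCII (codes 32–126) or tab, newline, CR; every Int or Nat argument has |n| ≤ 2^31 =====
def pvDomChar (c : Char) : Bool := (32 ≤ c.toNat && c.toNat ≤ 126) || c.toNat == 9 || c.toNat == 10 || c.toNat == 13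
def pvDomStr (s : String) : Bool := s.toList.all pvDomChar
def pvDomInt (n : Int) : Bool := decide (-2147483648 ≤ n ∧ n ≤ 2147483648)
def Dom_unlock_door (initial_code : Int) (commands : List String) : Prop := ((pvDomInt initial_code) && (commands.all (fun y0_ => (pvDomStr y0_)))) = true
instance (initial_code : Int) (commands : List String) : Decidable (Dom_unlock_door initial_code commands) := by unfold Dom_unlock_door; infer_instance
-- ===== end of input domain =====

-- B replaces A's pointer-over-digits state machine by two phases: scan the commands alone
-- collecting (unreduced offset, sign) events, then parse the code and replay the events with
-- mod len / mod 10 applied only at replay time (objective: alternative).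

-- ===== PORT A =====
-- [int(digit) for digit in str(initial_code)]; none = some int(digit) raised ValueError (excluded by Pre_)
def pvParse (initial_code : Int) : Option (List Int) :=
  (PySem.Int.toChars initial_code).mapM (fun c => PySem.Int.ofChars? [c])

def pvStepA (st : List Int × Int) (command : String) : List Int × Int :=
  if command = "L" then (st.1, PySem.Int.mod (st.2 - 1) (PySem.List.len st.1))
  else if command = "R" then (st.1, PySem.Int.mod (st.2 + 1) (PySem.List.len st.1))
  else if command = "D" then
    -- code[iterator] -= 1; if code[iterator] < 0: code[iterator] = 9
    let v := PySem.List.pyGetD st.1 st.2 0 - 1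
    (PySem.List.pySetD st.1 st.2 (if v < 0 then 9 else v), st.2)
  else if command = "U" then
    -- code[iterator] += 1; if code[iterator] > 9: code[iterator] = 0
    let v := PySem.List.pyGetD st.1 st.2 0 + 1
    (PySem.List.pySetD st.1 st.2 (if v > 9 then 0 else v), st.2)
  else st

def unlock_door (initial_code : Int) (commands : List String) : String :=
  match pvParse initial_code with
  | none => ""   -- unreachable under Pre_ (the comprehension raised)
  | some code =>
    let st := commands.foldl pvStepA (code, 0)
    PySem.Str.join "" (st.1.map PySem.Int.toStr)

-- ===== PORT B =====
-- phase 1: events.append((offset, ±1)) for U/D, offset ∓/± 1 for L/R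
def pvStepB (st : List (Int × Int) × Int) (c : String) : List (Int × Int) × Int :=
  if c = "L" then (st.1, st.2 - 1)
  else if c = "R" then (st.1, st.2 + 1)
  else if c = "U" then (st.1 ++ [(st.2, 1)], st.2)
  else if c = "D" then (st.1 ++ [(st.2, -1)], st.2)
  else st

-- phase 2 body: i = off % n; digits[i] = (digits[i] + s) % 10
def pvReplay (n : Int) (ds : List Int) (ev : Int × Int) : List Int :=
  let i := PySem.Int.mod ev.1 n
  PySem.List.pySetD ds i (PySem.Int.mod (PySem.List.pyGetD ds i 0 + ev.2) 10)

def unlock_door_alt (initial_code : Int) (commands : List String) : String :=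
  let ph := commands.foldl pvStepB ([], 0)
  match pvParse initial_code with
  | none => ""   -- unreachable under Pre_ (the comprehension raised)
  | some digits =>
    let n := PySem.List.len digits
    let ds := ph.1.foldl (pvReplay n) digits
    PySem.Str.join "" (ds.map PySem.Int.toStr)

-- ===== PRECONDITION & SPEC =====
-- Pre_ excludes negative initial_code, on which Python's int('-') raises ValueError (A returns on everything else).
def Pre_unlock_door (initial_code : Int) (_commands : List String) : Prop := 0 ≤ initial_code
instance (initial_code : Int) (commands : List String) : Decidable (Pre_unlock_door initial_code commands) := by unfold Pre_unlock_door; infer_instance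
def pvWitness_unlock_door : Int × List String := (327, ["U", "R", "D", "L", "L", "U", "R", "x"])

def Spec_unlock_door (initial_code : Int) (commands : List String) (out : String) : Prop := out = unlock_door_alt initial_code commands
instance (initial_code : Int) (commands : List String) (out : String) : Decidable (Spec_unlock_door initial_code commands out) := by unfold Spec_unlock_door; infer_instance

-- ===== CLAIM (what is proved, stated in full; the proofs are below) =====
def Claim_equal_unlock_door : Prop := ∀ (initial_code : Int) (commands : List String), Dom_unlock_door initial_code commands → Pre_unlock_door initial_code commands → Spec_unlock_door initial_code commands (unlock_door initial_code commands)

-- ===== LEMMAS AND PROOFS =====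

def pvInRange (ds : List Int) : Prop := ∀ v ∈ ds, 0 ≤ v ∧ v < 10

lemma pvReplay_length (n : Int) (ds : List Int) (ev : Int × Int) :
    (pvReplay n ds ev).length = ds.length := by
  simp [pvReplay, PySem.List.length_pySetD]

lemma pvReplay_range (n : Int) (hn : 0 < n) (ds : List Int) (ev : Int × Int) (h : pvInRange ds) :
    pvInRange (pvReplay n ds ev) := by
  intro v hv
  have hm : (0 : Int) ≤ PySem.Int.mod (PySem.List.pyGetD ds (PySem.Int.mod ev.1 n) 0 + ev.2) 10 ∧
      PySem.Int.mod (PySem.List.pyGetD ds (PySem.Int.mod ev.1 n) 0 + ev.2) 10 < 10 :=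
    ⟨PySem.Int.mod_nonneg _ (by norm_num), PySem.Int.mod_lt _ (by norm_num)⟩
  simp only [pvReplay] at hv
  rw [PySem.List.pySetD_of_nonneg _ _ (PySem.Int.mod_nonneg _ hn)] at hv
  rcases List.mem_or_eq_of_mem_set hv with h1 | h1
  · exact h v h1
  · exact h1 ▸ hm

lemma pvFoldReplay_length (n : Int) (evs : List (Int × Int)) : ∀ (ds : List Int),
    (evs.foldl (pvReplay n) ds).length = ds.length := by
  induction evs with
  | nil => intro ds; rfl
  | cons e rest ih => intro ds; rw [List.foldl_cons, ih, pvReplay_length]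

lemma pvFoldReplay_range (n : Int) (hn : 0 < n) (evs : List (Int × Int)) : ∀ (ds : List Int),
    pvInRange ds → pvInRange (evs.foldl (pvReplay n) ds) := by
  induction evs with
  | nil => intro ds h; exact h
  | cons e rest ih => intro ds h; exact ih _ (pvReplay_range n hn ds e h)

lemma pv_mod_shift (off d n : Int) (hn : 0 < n) :
    PySem.Int.mod (PySem.Int.mod off n + d) n = PySem.Int.mod (off + d) n := by
  rw [PySem.Int.mod_eq_emod_of_pos hn, PySem.Int.mod_eq_emod_of_pos hn,
    PySem.Int.mod_eq_emod_of_pos hn, Int.add_emod, Int.emod_emod_of_dvd _ dvd_rfl,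
    ← Int.add_emod]

lemma pv_mod_sub (off n : Int) (hn : 0 < n) :
    PySem.Int.mod (PySem.Int.mod off n - 1) n = PySem.Int.mod (off - 1) n := by
  rw [sub_eq_add_neg, sub_eq_add_neg, pv_mod_shift _ _ _ hn]

-- A's clamped decrement on an in-range digit is the mod-10 decrement.
lemma pv_clamp_down (a : Int) (h0 : 0 ≤ a) (h9 : a < 10) :
    (if a - 1 < 0 then (9 : Int) else a - 1) = PySem.Int.mod (a + (-1)) 10 := by
  rw [PySem.Int.mod_eq_emod_of_pos (by norm_num)]
  split_ifs with h <;> omega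

lemma pv_clamp_up (a : Int) (h0 : 0 ≤ a) (h9 : a < 10) :
    (if a + 1 > 9 then (0 : Int) else a + 1) = PySem.Int.mod (a + 1) 10 := by
  rw [PySem.Int.mod_eq_emod_of_pos (by norm_num)]
  split_ifs with h <;> omega

-- One U step of A on the partially replayed list IS one more replayed event.
lemma pvStepA_U (n : Int) (code : List Int) (hlen : (code.length : Int) = n)
    (hr : pvInRange code) (hn : 0 < n) (off : Int) :
    pvStepA (code, PySem.Int.mod off n) "U"
      = (pvReplay n code (off, 1), PySem.Int.mod off n) := by
  have hi0 : (0 : Int) ≤ PySem.Int.mod off n := PySem.Int.mod_nonneg _ hn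
  have hi1 : PySem.Int.mod off n < n := PySem.Int.mod_lt _ hn
  have hget : PySem.List.pyGetD code (PySem.Int.mod off n) 0
      = code[(PySem.Int.mod off n).toNat]'(by omega) :=
    PySem.List.pyGetD_eq_getElem _ _ hi0 (by omega)
  have hd := hr (code[(PySem.Int.mod off n).toNat]'(by omega)) (List.getElem_mem _)
  simp only [pvStepA, pvReplay, reduceIte, String.reduceEq]
  rw [hget, pv_clamp_up _ hd.1 hd.2, ← hget]

-- One D step of A on the partially replayed list IS one more replayed event.
lemma pvStepA_D (n : Int) (code : List Int) (hlen : (code.length : Int) = n)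
    (hr : pvInRange code) (hn : 0 < n) (off : Int) :
    pvStepA (code, PySem.Int.mod off n) "D"
      = (pvReplay n code (off, -1), PySem.Int.mod off n) := by
  have hi0 : (0 : Int) ≤ PySem.Int.mod off n := PySem.Int.mod_nonneg _ hn
  have hi1 : PySem.Int.mod off n < n := PySem.Int.mod_lt _ hn
  have hget : PySem.List.pyGetD code (PySem.Int.mod off n) 0
      = code[(PySem.Int.mod off n).toNat]'(by omega) :=
    PySem.List.pyGetD_eq_getElem _ _ hi0 (by omega)
  have hd := hr (code[(PySem.Int.mod off n).toNat]'(by omega)) (List.getElem_mem _)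
  simp only [pvStepA, pvReplay, reduceIte, String.reduceEq]
  rw [hget, pv_clamp_down _ hd.1 hd.2, ← hget]

-- Invariant: A's fold from a partially replayed state equals B's remaining events replayed.
lemma pvLoop (cmds : List String) : ∀ (code0 : List Int) (evs : List (Int × Int)) (off : Int),
    pvInRange code0 → 0 < (code0.length : Int) →
    cmds.foldl pvStepA (evs.foldl (pvReplay (code0.length : Int)) code0,
        PySem.Int.mod off (code0.length : Int))
      = ((cmds.foldl pvStepB (evs, off)).1.foldl (pvReplay (code0.length : Int)) code0,
         PySem.Int.mod (cmds.foldl pvStepB (evs, off)).2 (code0.length : Int)) := by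
  induction cmds with
  | nil => intro code0 evs off hr hn; rfl
  | cons cmd rest ih =>
    intro code0 evs off hr hn
    have hlen : PySem.List.len (evs.foldl (pvReplay (code0.length : Int)) code0)
        = (code0.length : Int) := by
      simp [PySem.List.len_eq, pvFoldReplay_length]
    have hlen' : (((evs.foldl (pvReplay (code0.length : Int)) code0).length : Nat) : Int)
        = (code0.length : Int) := by
      rw [pvFoldReplay_length]
    have hrng := pvFoldReplay_range (code0.length : Int) hn evs code0 hr
    by_cases hL : cmd = "L"
    · simp only [List.foldl_cons, pvStepA, pvStepB, hL, reduceIte]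
      rw [hlen, pv_mod_sub _ _ hn]
      exact ih code0 evs (off - 1) hr hn
    · by_cases hR : cmd = "R"
      · simp only [List.foldl_cons, pvStepA, pvStepB, hR, String.reduceEq, reduceIte]
        rw [hlen, pv_mod_shift _ _ _ hn]
        exact ih code0 evs (off + 1) hr hn
      · by_cases hU : cmd = "U"
        · simp only [List.foldl_cons, pvStepB, hU, String.reduceEq, reduceIte]
          rw [pvStepA_U (code0.length : Int) _ hlen' hrng hn off]
          have := ih code0 (evs ++ [(off, 1)]) off hr hn
          rw [List.foldl_append, List.foldl_cons, List.foldl_nil] at this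
          exact this
        · by_cases hD : cmd = "D"
          · simp only [List.foldl_cons, pvStepB, hD, String.reduceEq, reduceIte]
            rw [pvStepA_D (code0.length : Int) _ hlen' hrng hn off]
            have := ih code0 (evs ++ [(off, -1)]) off hr hn
            rw [List.foldl_append, List.foldl_cons, List.foldl_nil] at this
            exact this
          · simp only [List.foldl_cons, pvStepA, pvStepB, hL, hR, hU, hD, reduceIte]
            exact ih code0 evs off hr hn

-- chars produced by Nat.toDigitsCore are digit chars (or come from the accumulator)
lemma pv_toDigitsCore_mem : ∀ (f n : Nat) (acc : List Char) (c : Char),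
    c ∈ Nat.toDigitsCore 10 f n acc → c ∈ acc ∨ ∃ k, k < 10 ∧ c = Nat.digitChar k := by
  intro f
  induction f with
  | zero => intro n acc c hc; exact Or.inl hc
  | succ f ih =>
    intro n acc c hc
    simp only [Nat.toDigitsCore] at hc
    split at hc
    · rcases List.mem_cons.mp hc with h | h
      · exact Or.inr ⟨n % 10, Nat.mod_lt _ (by norm_num), h⟩
      · exact Or.inl h
    · rcases ih _ _ _ hc with h | h
      · rcases List.mem_cons.mp h with h | h
        · exact Or.inr ⟨n % 10, Nat.mod_lt _ (by norm_num), h⟩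
        · exact Or.inl h
      · exact Or.inr h

lemma pv_toDigitsCore_ne_nil : ∀ (f n : Nat) (acc : List Char),
    Nat.toDigitsCore 10 f n acc = [] → acc = [] := by
  intro f
  induction f with
  | zero => intro n acc h; exact h
  | succ f ih =>
    intro n acc h
    simp only [Nat.toDigitsCore] at h
    split at h
    · exact absurd h (by simp)
    · exact absurd (ih _ _ h) (by simp)

lemma pv_toChars_ne_nil (n : Int) : PySem.Int.toChars n ≠ [] := by
  unfold PySem.Int.toChars
  split
  · simp
  · intro h
    unfold Nat.toDigits at h
    simp only [Nat.toDigitsCore] at h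
    split at h
    · exact absurd h (by simp)
    · exact absurd (pv_toDigitsCore_ne_nil _ _ _ h) (by simp)

lemma pv_toChars_mem (n : Int) (c : Char) (hc : c ∈ PySem.Int.toChars n) :
    c = '-' ∨ ∃ k, k < 10 ∧ c = Nat.digitChar k := by
  unfold PySem.Int.toChars at hc
  split at hc
  · rcases List.mem_cons.mp hc with h | h
    · exact Or.inl h
    · rcases pv_toDigitsCore_mem _ _ _ _ h with h | h
      · exact absurd h (by simp)
      · exact Or.inr h
  · rcases pv_toDigitsCore_mem _ _ _ _ hc with h | h
    · exact absurd h (by simp)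
    · exact Or.inr h

lemma pv_digit_ofChars (k : Nat) (hk : k < 10) :
    PySem.Int.ofChars? [Nat.digitChar k] = some (k : Int) := by
  interval_cases k <;> decide

lemma pv_mapM_some {α β : Type} (p : α → Option β) : ∀ (cs : List α) (ys : List β),
    cs.mapM p = some ys → ys.length = cs.length ∧ ∀ y ∈ ys, ∃ c ∈ cs, p c = some y := by
  intro cs
  induction cs with
  | nil => intro ys h; simp_all
  | cons c rest ih =>
    intro ys h
    simp only [List.mapM_cons] at h
    cases hc : p c with
    | none => simp [hc] at h
    | some v =>
      rw [hc] at h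
      cases hr : rest.mapM p with
      | none => simp [hr] at h
      | some vs =>
        rw [hr] at h
        cases h
        rcases ih vs hr with ⟨hl, hm⟩
        constructor
        · simp [hl]
        · intro y hy
          rcases List.mem_cons.mp hy with h | h
          · exact ⟨c, List.mem_cons_self, by rw [hc, h]⟩
          · rcases hm y h with ⟨c', hc', hp⟩
            exact ⟨c', List.mem_cons_of_mem _ hc', hp⟩

lemma pvParse_digits (n : Int) (code : List Int) (h : pvParse n = some code) :
    code ≠ [] ∧ pvInRange code := by
  rcases pv_mapM_some _ _ _ h with ⟨hl, hm⟩
  constructor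
  · intro hnil
    subst hnil
    have : PySem.Int.toChars n = [] := by
      have h0 : (PySem.Int.toChars n).length = 0 := by simpa using hl.symm
      exact List.length_eq_zero_iff.mp h0
    exact pv_toChars_ne_nil n this
  · intro v hv
    rcases hm v hv with ⟨c, hc, hp⟩
    rcases pv_toChars_mem n c hc with h1 | ⟨k, hk, h2⟩
    · subst h1
      rw [show PySem.Int.ofChars? ['-'] = none from by decide] at hp
      simp at hp
    · subst h2
      rw [pv_digit_ofChars k hk] at hp
      have : (k : Int) = v := by injection hp
      omega

-- ===== VERDICT (by name: the statement is the Claim_ definition above) =====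
theorem unlock_door_spec : Claim_equal_unlock_door := by
  intro initial_code commands _ _
  unfold Spec_unlock_door unlock_door unlock_door_alt
  cases hp : pvParse initial_code with
  | none => rfl
  | some code =>
    rcases pvParse_digits initial_code code hp with ⟨hne, hr⟩
    have hpos : (0 : Int) < code.length := by
      have := List.length_pos_iff.mpr hne; omega
    have := pvLoop commands code [] 0 hr hpos
    simp only [List.foldl_nil] at this
    rw [show PySem.Int.mod 0 (code.length : Int) = 0 from by
      rw [PySem.Int.mod_eq_emod_of_pos hpos]; simp] at this
    simp only [PySem.List.len_eq]
    rw [this]
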